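-- pv_equiv track=rewrite | github.com/Tommaso-R-Marena/AutoEvolve | core/llm_agent.py | _has_duplicate_code
-- ===== SOURCE A (Python) =====
-- def _has_duplicate_code(code: str) -> bool:
--     """Check for duplicate code blocks."""
--     lines = code.split('\n')
--     line_hashes = {}
--
--     for i, line in enumerate(lines):
--         stripped = line.strip()
--         if len(stripped) > 10:  # Only check substantial lines
--             if stripped in line_hashes:
--                 return True
--             line_hashes[stripped] = i
--
--     return False
-- ===== SOURCE B (Python) =====
-- def _has_duplicate_code(code: str) -> bool:
--     """Check for duplicate code blocks (sort-then-adjacent-compare)."""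
--     substantial = [s for s in (line.strip() for line in code.split('\n'))
--                    if len(s) > 10]
--     substantial.sort()
--     for a, b in zip(substantial, substantial[1:]):
--         if a == b:
--             return True
--     return False
-- ===== Notes on version B (the rewrite author's own statement) =====
-- stated objective: alternative
-- what changed: Replaces the incremental dict-membership loop with early exit by collecting the stripped substantial lines, sorting them, and scanning adjacent pairs for an equal neighbour.
import Mathlib
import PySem

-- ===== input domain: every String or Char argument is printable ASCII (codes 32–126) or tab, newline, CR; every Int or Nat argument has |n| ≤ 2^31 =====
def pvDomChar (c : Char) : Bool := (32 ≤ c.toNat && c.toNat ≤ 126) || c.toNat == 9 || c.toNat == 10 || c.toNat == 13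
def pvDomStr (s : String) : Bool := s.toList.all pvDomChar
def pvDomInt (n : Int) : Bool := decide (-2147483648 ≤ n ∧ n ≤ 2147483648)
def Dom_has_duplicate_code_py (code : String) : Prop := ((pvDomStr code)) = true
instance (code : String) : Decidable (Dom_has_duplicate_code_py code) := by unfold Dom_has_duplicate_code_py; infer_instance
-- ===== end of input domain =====

-- B replaces A's incremental dict-membership loop (early exit) by sort-then-adjacent-compare; alternative algorithm, same results.


-- ===== PORT A =====
-- the 'for i, line in enumerate(lines)' loop with the line_hashes dict and early return
def hdcLoopA : List String → PySem.Dict String Int → Int → Bool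
  | [], _, _ => false
  | line :: rest, d, i =>
    let stripped := PySem.Str.strip line
    if 10 < PySem.Str.len stripped then
      if d.contains stripped then true
      else hdcLoopA rest (d.insert stripped i) (i + 1)
    else hdcLoopA rest d (i + 1)

def has_duplicate_code_py (code : String) : Bool :=
  hdcLoopA ((PySem.Str.split? code "\n").getD []) PySem.Dict.empty 0

-- ===== PORT B =====
-- scan of zip(substantial, substantial[1:]) for an equal adjacent pair
def hdcAdj : List String → Bool
  | x :: y :: t => if x == y then true else hdcAdj (y :: t)
  | _ => false

def has_duplicate_code_py_alt (code : String) : Bool :=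
  let substantial := ((PySem.Str.split? code "\n").getD []).filterMap (fun line =>
    let s := PySem.Str.strip line
    if 10 < PySem.Str.len s then some s else none)
  hdcAdj (PySem.List.sorted substantial (fun x => x) false)

-- ===== PRECONDITION & SPEC =====
def Spec_has_duplicate_code_py (code : String) (out : Bool) : Prop := out = has_duplicate_code_py_alt code
instance (code : String) (out : Bool) : Decidable (Spec_has_duplicate_code_py code out) := by unfold Spec_has_duplicate_code_py; infer_instance

-- ===== CLAIM (what is proved, stated in full; the proofs are below) =====
def Claim_equal_has_duplicate_code_py : Prop := ∀ (code : String), Dom_has_duplicate_code_py code → Spec_has_duplicate_code_py code (has_duplicate_code_py code)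

-- ===== LEMMAS AND PROOFS =====

-- the substantial lines of a line list
def hdcFiltered (ls : List String) : List String :=
  ls.filterMap (fun line =>
    let s := PySem.Str.strip line
    if 10 < PySem.Str.len s then some s else none)

theorem hdcLoopA_iff (ls : List String) (d : PySem.Dict String Int) (i : Int) :
    hdcLoopA ls d i = true ↔ (∃ s ∈ hdcFiltered ls, d.contains s = true) ∨ ¬ (hdcFiltered ls).Nodup := by
  induction ls generalizing d i with
  | nil => simp [hdcLoopA, hdcFiltered]
  | cons line rest ih =>
    by_cases hlen : 10 < PySem.Str.len (PySem.Str.strip line)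
    · have hf : hdcFiltered (line :: rest) = PySem.Str.strip line :: hdcFiltered rest := by
        simp only [hdcFiltered, List.filterMap_cons, if_pos hlen]
      cases hcd : d.contains (PySem.Str.strip line) with
      | true =>
        have hl : hdcLoopA (line :: rest) d i = true := by
          simp only [hdcLoopA, if_pos hlen, hcd, if_true]
        rw [hl, hf]
        simp only [List.mem_cons, true_iff]
        exact Or.inl ⟨PySem.Str.strip line, Or.inl rfl, hcd⟩
      | false =>
        have hl : hdcLoopA (line :: rest) d i
            = hdcLoopA rest (d.insert (PySem.Str.strip line) i) (i + 1) := by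
          simp only [hdcLoopA, if_pos hlen, hcd, Bool.false_eq_true, if_false]
        rw [hl, ih, hf]
        simp only [PySem.Dict.contains_insert, List.mem_cons, List.nodup_cons,
          Bool.or_eq_true, beq_iff_eq]
        constructor
        · rintro (⟨s, hs, heq | hc2⟩ | hnd)
          · subst heq
            right; intro h; exact h.1 hs
          · exact Or.inl ⟨s, Or.inr hs, hc2⟩
          · right; intro h; exact hnd h.2
        · rintro (⟨s, rfl | hs, hc2⟩ | hnd)
          · rw [hcd] at hc2; cases hc2
          · exact Or.inl ⟨s, hs, Or.inr hc2⟩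
          · by_cases hmem : PySem.Str.strip line ∈ hdcFiltered rest
            · exact Or.inl ⟨PySem.Str.strip line, hmem, Or.inl rfl⟩
            · right; intro hnd'; exact hnd ⟨hmem, hnd'⟩
    · have hf : hdcFiltered (line :: rest) = hdcFiltered rest := by
        simp only [hdcFiltered, List.filterMap_cons, if_neg hlen]
      have hl : hdcLoopA (line :: rest) d i = hdcLoopA rest d (i + 1) := by
        simp only [hdcLoopA, if_neg hlen]
      rw [hl, ih, hf]

-- on a ≤-sorted list, an equal adjacent pair is exactly a duplicate
theorem hdcAdj_iff (l : List String) (hp : l.Pairwise (· ≤ ·)) :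
    hdcAdj l = true ↔ ¬ l.Nodup := by
  induction l with
  | nil => simp [hdcAdj]
  | cons x t ih =>
    cases t with
    | nil => simp [hdcAdj]
    | cons y t' =>
      rcases List.pairwise_cons.mp hp with ⟨hxall, hp'⟩
      by_cases hxy : x = y
      · subst hxy
        have hl : hdcAdj (x :: x :: t') = true := by simp [hdcAdj]
        rw [hl]
        simp [List.nodup_cons]
      · have hl : hdcAdj (x :: y :: t') = hdcAdj (y :: t') := by
          simp [hdcAdj, hxy]
        have hxnotmem : x ∉ y :: t' := by
          intro hmem
          rcases List.mem_cons.mp hmem with rfl | hmem'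
          · exact hxy rfl
          · have hxy' : x ≤ y := hxall y (List.mem_cons_self ..)
            have hyx : y ≤ x := (List.pairwise_cons.mp hp').1 x hmem'
            exact hxy (le_antisymm hxy' hyx)
        rw [hl, ih hp']
        constructor
        · intro hnd hn; exact hnd (List.nodup_cons.mp hn).2
        · intro hn hnd'; exact hn (List.nodup_cons.mpr ⟨hxnotmem, hnd'⟩)

-- ===== VERDICT (by name: the statement is the Claim_ definition above) =====
theorem has_duplicate_code_py_spec : Claim_equal_has_duplicate_code_py := by
  intro code _
  unfold Spec_has_duplicate_code_py has_duplicate_code_py has_duplicate_code_py_alt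
  set ls := (PySem.Str.split? code "\n").getD []
  have hA := hdcLoopA_iff ls PySem.Dict.empty 0
  simp only [PySem.Dict.contains_empty, Bool.false_eq_true, and_false, exists_false,
    false_or] at hA
  have hsorted := PySem.List.sorted_pairwise (xs := hdcFiltered ls) (key := fun x => x)
  have hB := hdcAdj_iff (PySem.List.sorted (hdcFiltered ls) (fun x => x) false) hsorted
  have hperm : (PySem.List.sorted (hdcFiltered ls) (fun x => x) false).Perm (hdcFiltered ls) :=
    PySem.List.sorted_perm ..
  rw [hperm.nodup_iff] at hB
  show hdcLoopA ls PySem.Dict.empty 0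
      = hdcAdj (PySem.List.sorted (hdcFiltered ls) (fun x => x) false)
  rcases Bool.eq_false_or_eq_true (hdcLoopA ls PySem.Dict.empty 0) with h | h <;>
    rcases Bool.eq_false_or_eq_true
      (hdcAdj (PySem.List.sorted (hdcFiltered ls) (fun x => x) false)) with h2 | h2 <;>
    simp_all
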